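-- pv_equiv track=rewrite | github.com/xenoturbellida/coding_decoding_algs | move_to_front_decoding.py | separate_code_words
-- ===== SOURCE A (Python) =====
-- def separate_code_words(code_line: str, accepted_words: [str]) -> [str]:
--     current_word = ''
--     separated_code = []
--     for bit in code_line:
--         current_word += bit
--         if current_word in accepted_words:
--             separated_code.append(current_word)
--             current_word = ''
--
--     return separated_code
-- ===== SOURCE B (Python) =====
-- def separate_code_words(code_line: str, accepted_words: [str]) -> [str]:
--     accepted = set(accepted_words)
--     lengths = sorted({len(w) for w in accepted_words if w})
--     separated_code = []
--     i = 0
--     n = len(code_line)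
--     while i < n:
--         for L in lengths:
--             piece = code_line[i:i + L]
--             if piece in accepted:
--                 separated_code.append(piece)
--                 i += L
--                 break
--         else:
--             break
--     return separated_code
-- ===== Notes on version B (the rewrite author's own statement) =====
-- stated objective: faster
-- what changed: Replaces A's bit-by-bit accumulation with a per-character list-membership scan by an integer pointer that, at each position, tries the precomputed sorted distinct accepted word lengths ascending against a precomputed set, consuming the first accepted slice.
import Mathlib
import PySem

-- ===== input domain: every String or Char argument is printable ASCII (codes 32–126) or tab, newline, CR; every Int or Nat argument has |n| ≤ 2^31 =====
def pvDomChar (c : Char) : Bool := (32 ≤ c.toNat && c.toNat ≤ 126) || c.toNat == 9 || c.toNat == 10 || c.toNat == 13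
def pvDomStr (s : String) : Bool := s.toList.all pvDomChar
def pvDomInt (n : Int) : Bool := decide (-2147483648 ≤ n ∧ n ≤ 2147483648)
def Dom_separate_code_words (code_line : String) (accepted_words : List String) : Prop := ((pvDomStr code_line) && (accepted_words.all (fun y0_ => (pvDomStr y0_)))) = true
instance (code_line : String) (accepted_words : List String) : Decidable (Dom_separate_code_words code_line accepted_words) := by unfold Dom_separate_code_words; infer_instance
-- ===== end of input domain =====

-- B replaces A's bit-by-bit accumulation (per-char scan of the word list) with a pointer trying the sorted distinct accepted word lengths against a precomputed set at each position; measured faster, same exact result.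

-- ===== PORT A =====
-- A: accumulate characters into current_word, emit and reset when it is in accepted_words.
def separate_code_words (code_line : String) (accepted_words : List String) : List String :=
  let aw := accepted_words.map String.toList
  let r := code_line.toList.foldl
    (fun (st : List Char × List (List Char)) bit =>
      let cur := st.1 ++ [bit]
      if cur ∈ aw then ([], st.2 ++ [cur]) else (cur, st.2))
    ([], [])
  r.2.map (fun l => String.mk l)

-- ===== PORT B =====
-- lengths = sorted({len(w) for w in accepted_words if w})
def scwLengths (aw : List (List Char)) : List Nat :=
  PySem.List.sorted (PySem.Set.ofList ((aw.filter (fun w => !w.isEmpty)).map List.length)) (fun x => x) false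

-- the inner 'for L in lengths' with break/else: first L whose slice is accepted.
-- The '!piece.isEmpty' conjunct is a totality guard for the loop below; at every
-- reachable call (i < n, every L ≥ 1) the slice is nonempty, exactly as in Source B.
def scwFind (accepted : PySem.Set (List Char)) (rest : List Char) : List Nat → Option (Nat × List Char)
  | [] => none
  | L :: ls =>
    let piece := rest.take L
    if !piece.isEmpty && decide (piece ∈ accepted) then some (L, piece) else scwFind accepted rest ls

theorem scwFind_pos (accepted : PySem.Set (List Char)) (rest : List Char) (ls : List Nat)
    (L : Nat) (p : List Char) (h : scwFind accepted rest ls = some (L, p)) :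
    1 ≤ L ∧ rest ≠ [] := by
  induction ls with
  | nil => simp [scwFind] at h
  | cons L0 ls ih =>
    simp only [scwFind] at h
    split at h
    · rename_i hc
      simp only [Bool.and_eq_true, Bool.not_eq_true', List.isEmpty_eq_false_iff, decide_eq_true_eq] at hc
      simp only [Option.some.injEq, Prod.mk.injEq] at h
      obtain ⟨hL, hp⟩ := h
      have hne := hc.1
      constructor
      · rw [← hL]
        by_contra hz
        have h0 : L0 = 0 := by omega
        rw [h0] at hne; simp at hne
      · intro hr; subst hr; simp at hne
    · exact ih h

-- while i < n: find the first accepted slice, append it, advance i by L; break if none.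
def scwLoop (cl : List Char) (accepted : PySem.Set (List Char)) (lengths : List Nat)
    (i : Nat) (out : List (List Char)) : List (List Char) :=
  if h : i < cl.length then
    match hf : scwFind accepted (cl.drop i) lengths with
    | some (L, piece) => scwLoop cl accepted lengths (i + L) (out ++ [piece])
    | none => out
  else out
termination_by cl.length - i
decreasing_by
  have := (scwFind_pos accepted (cl.drop i) lengths L piece hf).1
  omega

def separate_code_words_alt (code_line : String) (accepted_words : List String) : List String :=
  let aw := accepted_words.map String.toList
  let accepted := PySem.Set.ofList aw
  let lengths := scwLengths aw
  (scwLoop code_line.toList accepted lengths 0 []).map (fun l => String.mk l)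

-- ===== PRECONDITION & SPEC =====
def Spec_separate_code_words (code_line : String) (accepted_words : List String) (out : List String) : Prop := out = separate_code_words_alt code_line accepted_words
instance (code_line : String) (accepted_words : List String) (out : List String) : Decidable (Spec_separate_code_words code_line accepted_words out) := by unfold Spec_separate_code_words; infer_instance

-- ===== CLAIM (what is proved, stated in full; the proofs are below) =====
def Claim_equal_separate_code_words : Prop := ∀ (code_line : String) (accepted_words : List String), Dom_separate_code_words code_line accepted_words → Spec_separate_code_words code_line accepted_words (separate_code_words code_line accepted_words)

-- ===== LEMMAS AND PROOFS =====

-- A's loop with the accumulator factored out.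
def gA (aw : List (List Char)) : List Char → List Char → List (List Char)
  | _cur, [] => []
  | cur, c :: rs =>
    let cur' := cur ++ [c]
    if cur' ∈ aw then cur' :: gA aw [] rs else gA aw cur' rs

theorem foldA_eq (aw : List (List Char)) (rest : List Char) :
    ∀ (cur : List Char) (acc : List (List Char)),
      (rest.foldl
        (fun (st : List Char × List (List Char)) bit =>
          let cur := st.1 ++ [bit]
          if cur ∈ aw then (([] : List Char), st.2 ++ [cur]) else (cur, st.2))
        (cur, acc)).2 = acc ++ gA aw cur rest := by
  induction rest with
  | nil => intro cur acc; simp [gA]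
  | cons c rs ih =>
    intro cur acc
    simp only [List.foldl_cons, gA]
    by_cases hm : cur ++ [c] ∈ aw
    · simp only [hm, if_pos]
      rw [ih [] (acc ++ [cur ++ [c]])]
      simp
    · simp only [hm, if_neg, not_false_iff]
      exact ih (cur ++ [c]) acc

-- B's loop as a recursion on the remaining suffix.
def gB (accepted : PySem.Set (List Char)) (lengths : List Nat) (rest : List Char) :
    List (List Char) :=
  match hf : scwFind accepted rest lengths with
  | some (L, piece) => piece :: gB accepted lengths (rest.drop L)
  | none => []
termination_by rest.length
decreasing_by
  have h := scwFind_pos accepted rest lengths L piece hf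
  have : rest.length ≠ 0 := by
    intro h0; exact h.2 (List.eq_nil_of_length_eq_zero h0)
  simp only [List.length_drop]; omega

theorem gB_some (accepted : PySem.Set (List Char)) (lengths : List Nat) (rest : List Char)
    (L : Nat) (piece : List Char) (hf : scwFind accepted rest lengths = some (L, piece)) :
    gB accepted lengths rest = piece :: gB accepted lengths (rest.drop L) := by
  rw [gB]
  split
  · rename_i L' p' heq
    rw [hf] at heq
    simp only [Option.some.injEq, Prod.mk.injEq] at heq
    rw [heq.1, heq.2]
  · rename_i heq
    rw [hf] at heq
    cases heq

theorem gB_none (accepted : PySem.Set (List Char)) (lengths : List Nat) (rest : List Char)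
    (hf : scwFind accepted rest lengths = none) :
    gB accepted lengths rest = [] := by
  rw [gB]
  split
  · rename_i L' p' heq
    rw [hf] at heq
    cases heq
  · rfl

theorem scwFind_nil (accepted : PySem.Set (List Char)) (ls : List Nat) :
    scwFind accepted [] ls = none := by
  induction ls with
  | nil => rfl
  | cons L ls ih => simp [scwFind, ih]

theorem scwLoop_eq (cl : List Char) (accepted : PySem.Set (List Char)) (lengths : List Nat)
    (i : Nat) (out : List (List Char)) :
    scwLoop cl accepted lengths i out = out ++ gB accepted lengths (cl.drop i) := by
  induction i, out using scwLoop.induct cl accepted lengths with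
  | case1 i out h L piece hf ih =>
    rw [scwLoop]
    simp only [h, dif_pos]
    split
    · rename_i L' p' heq
      rw [hf] at heq
      simp only [Option.some.injEq, Prod.mk.injEq] at heq
      obtain ⟨hL, hp⟩ := heq
      subst hL; subst hp
      rw [ih, gB_some accepted lengths (cl.drop i) L piece hf]
      rw [List.drop_drop]
      simp
    · rename_i heq
      rw [hf] at heq
      cases heq
  | case2 i out h hf =>
    rw [scwLoop]
    simp only [h, dif_pos]
    split
    · rename_i L' p' heq
      rw [hf] at heq
      cases heq
    · rw [gB_none accepted lengths (cl.drop i) hf]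
      simp
  | case3 i out h =>
    rw [scwLoop]
    simp only [h, dif_neg, not_false_iff]
    have hd : cl.drop i = [] := List.drop_eq_nil_of_le (by omega)
    rw [hd, gB_none accepted lengths [] (scwFind_nil accepted lengths)]
    simp

theorem scwFind_some_spec (accepted : PySem.Set (List Char)) (rest : List Char) :
    ∀ (ls : List Nat) (L : Nat) (p : List Char),
      scwFind accepted rest ls = some (L, p) →
      L ∈ ls ∧ p = rest.take L ∧ p ≠ [] ∧ p ∈ accepted := by
  intro ls
  induction ls with
  | nil => intro L p h; simp [scwFind] at h
  | cons L0 ls ih =>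
    intro L p h
    simp only [scwFind] at h
    split at h
    · rename_i hc
      simp only [Bool.and_eq_true, Bool.not_eq_true', List.isEmpty_eq_false_iff,
        decide_eq_true_eq] at hc
      simp only [Option.some.injEq, Prod.mk.injEq] at h
      obtain ⟨hL, hp⟩ := h
      subst hL; subst hp
      exact ⟨by simp, rfl, hc.1, hc.2⟩
    · obtain ⟨m, e, ne, mem⟩ := ih L p h
      exact ⟨List.mem_cons_of_mem _ m, e, ne, mem⟩

theorem scwFind_none_spec (accepted : PySem.Set (List Char)) (rest : List Char) :
    ∀ (ls : List Nat), scwFind accepted rest ls = none →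
      ∀ L ∈ ls, rest.take L ≠ [] → rest.take L ∉ accepted := by
  intro ls
  induction ls with
  | nil => simp
  | cons L0 ls ih =>
    intro h
    simp only [scwFind] at h
    split at h
    · exact absurd h (by simp)
    · rename_i hc
      simp only [Bool.and_eq_true, Bool.not_eq_true', List.isEmpty_eq_false_iff,
        decide_eq_true_eq, not_and] at hc
      intro L hL hne
      rcases List.mem_cons.mp hL with rfl | hL'
      · exact hc hne
      · exact ih h L hL' hne

theorem scwFind_min (accepted : PySem.Set (List Char)) (rest : List Char) :
    ∀ (ls : List Nat), ls.Pairwise (· < ·) →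
      ∀ (L : Nat) (p : List Char), scwFind accepted rest ls = some (L, p) →
      ∀ L' ∈ ls, rest.take L' ≠ [] → rest.take L' ∈ accepted → L ≤ L' := by
  intro ls
  induction ls with
  | nil => intro _ L p h; simp [scwFind] at h
  | cons L0 ls ih =>
    intro hs L p h L' hL' hne hmem
    simp only [scwFind] at h
    split at h
    · have hL : L = L0 := by
        simp only [Option.some.injEq, Prod.mk.injEq] at h
        exact h.1.symm
      subst hL
      rcases List.mem_cons.mp hL' with rfl | hm
      · exact le_refl _
      · exact le_of_lt ((List.pairwise_cons.mp hs).1 _ hm)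
    · rename_i hc
      simp only [Bool.and_eq_true, Bool.not_eq_true', List.isEmpty_eq_false_iff,
        decide_eq_true_eq, not_and] at hc
      rcases List.mem_cons.mp hL' with rfl | hm
      · exact absurd hmem (hc hne)
      · exact ih (List.pairwise_cons.mp hs).2 L p h L' hm hne hmem

theorem scwLengths_mem (aw : List (List Char)) (j : Nat) :
    j ∈ scwLengths aw ↔ ∃ w, w ∈ aw ∧ w ≠ [] ∧ w.length = j := by
  unfold scwLengths
  rw [PySem.List.mem_sorted, PySem.Set.mem_ofList]
  simp only [List.mem_map, List.mem_filter, Bool.not_eq_true', List.isEmpty_eq_false_iff]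
  constructor
  · rintro ⟨w, ⟨hw, hne⟩, hlen⟩; exact ⟨w, hw, hne, hlen⟩
  · rintro ⟨w, hw, hne, hlen⟩; exact ⟨w, ⟨hw, hne⟩, hlen⟩

theorem scwLengths_sorted (aw : List (List Char)) :
    (scwLengths aw).Pairwise (· < ·) :=
  PySem.List.sorted_ofList_pairwise_lt _

theorem gA_nomatch (aw : List (List Char)) :
    ∀ (rest cur : List Char),
      (∀ j, 1 ≤ j → j ≤ rest.length → (cur ++ rest.take j) ∉ aw) →
      gA aw cur rest = [] := by
  intro rest
  induction rest with
  | nil => intro cur _; rfl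
  | cons c rs ih =>
    intro cur hno
    have h1 : (cur ++ [c]) ∉ aw := by
      have := hno 1 (by omega) (by simp)
      simpa using this
    simp only [gA, h1, if_neg, not_false_iff]
    apply ih
    intro j hj1 hj2
    have := hno (j + 1) (by omega) (by simp; omega)
    simpa [List.take_succ_cons, List.append_assoc] using this

theorem gA_match (aw : List (List Char)) :
    ∀ (rest cur : List Char) (k : Nat), 1 ≤ k → k ≤ rest.length →
      (cur ++ rest.take k) ∈ aw →
      (∀ j, 1 ≤ j → j < k → (cur ++ rest.take j) ∉ aw) →
      gA aw cur rest = (cur ++ rest.take k) :: gA aw [] (rest.drop k) := by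
  intro rest
  induction rest with
  | nil => intro cur k h1 h2 _ _; simp at h2; omega
  | cons c rs ih =>
    intro cur k h1 h2 hmem hmin
    match k, h1 with
    | 1, _ =>
      simp only [List.take_succ_cons, List.take_zero] at hmem
      simp only [gA, hmem, if_pos]
      simp
    | (k' + 2), _ =>
      have hhead : (cur ++ [c]) ∉ aw := by
        have := hmin 1 (by omega) (by omega)
        simpa using this
      simp only [gA, hhead, if_neg, not_false_iff]
      have hrec := ih (cur ++ [c]) (k' + 1) (by omega) (by simp at h2; omega)
        (by simpa [List.take_succ_cons, List.append_assoc] using hmem)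
        (fun j hj1 hj2 => by
          have := hmin (j + 1) (by omega) (by omega)
          simpa [List.take_succ_cons, List.append_assoc] using this)
      rw [hrec]
      simp [List.take_succ_cons, List.append_assoc]

theorem take_min_eq (rest : List Char) (L : Nat) :
    rest.take (min L rest.length) = rest.take L := by
  by_cases h : L ≤ rest.length
  · rw [Nat.min_eq_left h]
  · have h' : rest.length ≤ L := by omega
    rw [Nat.min_eq_right h', List.take_length, List.take_of_length_le h']

theorem drop_min_eq (rest : List Char) (L : Nat) :
    rest.drop (min L rest.length) = rest.drop L := by
  by_cases h : L ≤ rest.length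
  · rw [Nat.min_eq_left h]
  · have h' : rest.length ≤ L := by omega
    rw [Nat.min_eq_right h', List.drop_length, List.drop_eq_nil_of_le h']

theorem main_eq (aw : List (List Char)) (rest : List Char) :
    gA aw [] rest = gB (PySem.Set.ofList aw) (scwLengths aw) rest := by
  induction hn : rest.length using Nat.strong_induction_on generalizing rest with
  | _ n ih =>
  subst hn
  cases hf : scwFind (PySem.Set.ofList aw) rest (scwLengths aw) with
  | some Lp =>
    obtain ⟨L, p⟩ := Lp
    obtain ⟨hLmem, hp, hpne, hpacc⟩ := scwFind_some_spec _ _ _ _ _ hf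
    have hL1 : 1 ≤ L ∧ rest ≠ [] := scwFind_pos _ _ _ _ _ hf
    set m := p.length with hm
    have hmlen : m = min L rest.length := by rw [hm, hp, List.length_take]
    have hm1 : 1 ≤ m := by
      rcases Nat.eq_zero_or_pos m with h0 | h1
      · exact absurd (List.eq_nil_of_length_eq_zero h0) hpne
      · exact h1
    have hmle : m ≤ rest.length := by omega
    have htake : rest.take m = p := by
      rw [hmlen, take_min_eq, ← hp]
    have hpaw : p ∈ aw := (PySem.Set.mem_ofList _ _).mp hpacc
    have hmin : ∀ j, 1 ≤ j → j < m → ([] : List Char) ++ rest.take j ∉ aw := by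
      intro j hj1 hj2 hjmem
      simp only [List.nil_append] at hjmem
      have hjlen : (rest.take j).length = j := by
        rw [List.length_take]; omega
      have hjne : rest.take j ≠ [] := by
        intro h0; rw [h0] at hjlen; simp at hjlen; omega
      have hjL : j ∈ scwLengths aw :=
        (scwLengths_mem aw j).mpr ⟨rest.take j, hjmem, hjne, hjlen⟩
      have := scwFind_min _ _ _ (scwLengths_sorted aw) _ _ hf j hjL hjne
        ((PySem.Set.mem_ofList _ _).mpr hjmem)
      omega
    have hA := gA_match aw rest [] m hm1 hmle
      (by simp only [List.nil_append]; rw [htake]; exact hpaw) hmin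
    rw [gB_some _ _ _ _ _ hf, hA]
    simp only [List.nil_append, htake]
    congr 1
    have hdrop : rest.drop m = rest.drop L := by
      rw [hmlen, drop_min_eq]
    rw [hdrop]
    exact ih (rest.drop L).length (by simp only [List.length_drop]; omega) _ rfl
  | none =>
    rw [gB_none _ _ _ hf]
    apply gA_nomatch
    intro j hj1 hj2 hjmem
    simp only [List.nil_append] at hjmem
    have hrne : rest ≠ [] := by
      intro h0; subst h0; simp at hj2; omega
    have hjlen : (rest.take j).length = j := by rw [List.length_take]; omega
    have hjne : rest.take j ≠ [] := by
      intro h0; rw [h0] at hjlen; simp at hjlen; omega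
    have hjL : j ∈ scwLengths aw :=
      (scwLengths_mem aw j).mpr ⟨rest.take j, hjmem, hjne, hjlen⟩
    exact scwFind_none_spec _ _ _ hf j hjL hjne ((PySem.Set.mem_ofList _ _).mpr hjmem)

-- ===== VERDICT (by name: the statement is the Claim_ definition above) =====
theorem separate_code_words_spec : Claim_equal_separate_code_words := by
  intro code_line accepted_words _
  unfold Spec_separate_code_words
  simp only [separate_code_words, separate_code_words_alt]
  rw [foldA_eq, scwLoop_eq, List.drop_zero, main_eq]
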